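-- pv_equiv track=rewrite | github.com/garfield0xff-cochl/sense-tvm | sense/python/transforms/storage_planner.py | analyze_liveness
-- ===== SOURCE A (Python) =====
-- from typing import Dict, List, Tuple, Set
--
-- def analyze_liveness(operations: List[Dict], tensor_shapes: Dict) -> Dict[str, Tuple[int, int]]:
--     """Analyze buffer liveness from operations.
--
--     Parameters
--     ----------
--     operations : List[Dict]
--         List of operation dictionaries.
--     tensor_shapes : Dict
--         Tensor name to shape mapping.
--
--     Returns
--     -------
--     liveness : Dict[str, Tuple[int, int]]
--         Buffer name to (first_use, last_use) mapping.
--     """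
--     liveness = {}
--
--     for op_idx, op in enumerate(operations):
--         args = op.get('args', [])
--
--         # Track all buffer references
--         for arg_type, arg_val in args:
--             if arg_type == 'alloc':
--                 buffer_name = arg_val
--
--                 if buffer_name not in liveness:
--                     liveness[buffer_name] = (op_idx, op_idx)
--                 else:
--                     first, _ = liveness[buffer_name]
--                     liveness[buffer_name] = (first, op_idx)
--
--     return liveness
-- ===== SOURCE B (Python) =====
-- def analyze_liveness(operations, tensor_shapes):
--     """Declarative version: flatten operations into a list of (buffer, op_idx)
--     alloc events, collect distinct buffer names in first-occurrence order,
--     then read each buffer's interval off its occurrence indices."""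
--     events = [(arg_val, op_idx)
--               for op_idx, op in enumerate(operations)
--               for arg_type, arg_val in op.get('args', [])
--               if arg_type == 'alloc']
--     names = []
--     for n, _ in events:
--         if n not in names:
--             names.append(n)
--     liveness = {}
--     for n in names:
--         idxs = [i for m, i in events if m == n]
--         liveness[n] = (idxs[0], idxs[-1])
--     return liveness
-- ===== Notes on version B (the rewrite author's own statement) =====
-- stated objective: alternative
-- what changed: A maintains a running (first,last) interval in a dict during one nested scan; B instead flattens the operations into a flat list of (buffer, op_idx) alloc events, deduplicates the buffer names in first-occurrence order, and then reads each buffer's interval as the first and last element of its per-name occurrence-index sublist.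
import Mathlib
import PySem

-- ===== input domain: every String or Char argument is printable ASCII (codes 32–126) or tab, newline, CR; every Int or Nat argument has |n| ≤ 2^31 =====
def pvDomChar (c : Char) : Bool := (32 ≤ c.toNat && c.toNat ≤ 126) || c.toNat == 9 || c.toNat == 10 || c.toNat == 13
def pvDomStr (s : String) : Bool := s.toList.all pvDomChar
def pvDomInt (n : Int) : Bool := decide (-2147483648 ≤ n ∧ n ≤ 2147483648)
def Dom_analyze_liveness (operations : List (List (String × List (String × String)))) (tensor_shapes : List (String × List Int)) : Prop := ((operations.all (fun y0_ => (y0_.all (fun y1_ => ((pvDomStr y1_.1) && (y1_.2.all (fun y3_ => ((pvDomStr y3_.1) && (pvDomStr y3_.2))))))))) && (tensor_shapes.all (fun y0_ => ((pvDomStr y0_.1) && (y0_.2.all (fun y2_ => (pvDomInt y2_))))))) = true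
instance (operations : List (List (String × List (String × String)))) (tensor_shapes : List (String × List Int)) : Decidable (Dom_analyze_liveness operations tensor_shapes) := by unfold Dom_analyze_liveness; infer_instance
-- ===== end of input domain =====

-- B replaces A's single running-interval scan by a flatten-to-events pass, a first-occurrence
-- name dedup, and a per-name read-off of (first, last) occurrence index; alternative decomposition.


-- ===== PORT A =====
-- one 'alloc'-tracking step of A's inner loop (running-interval update)
def stepA (op_idx : Int) (liveness : PySem.Dict String (Int × Int)) (arg : String × String) :
    PySem.Dict String (Int × Int) :=
  if arg.1 == "alloc" then
    let buffer_name := arg.2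
    if liveness.contains buffer_name = false then
      liveness.insert buffer_name (op_idx, op_idx)
    else
      liveness.insert buffer_name ((liveness.getD buffer_name (0, 0)).1, op_idx)
  else liveness

def analyze_liveness (operations : List (List (String × List (String × String)))) (tensor_shapes : List (String × List Int)) : List (String × Int × Int) :=
  ((PySem.List.enumerate operations 0).foldl
      (fun liveness p => ((PySem.Dict.mk p.2).getD "args" []).foldl (stepA p.1) liveness)
      PySem.Dict.empty).items

-- ===== PORT B =====
-- the flat event-list comprehension: [(arg_val, op_idx) for op_idx, op … for arg_type, arg_val … if 'alloc']
def pyEvents (operations : List (List (String × List (String × String)))) : List (String × Int) :=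
  (PySem.List.enumerate operations 0).flatMap
    (fun p => ((PySem.Dict.mk p.2).getD "args" []).filterMap
      (fun a => if a.1 == "alloc" then some (a.2, p.1) else none))

-- the dedup loop: names.append(n) unless already present
def pyNames (events : List (String × Int)) : List String :=
  events.foldl (fun names e => if names.contains e.1 then names else names ++ [e.1]) []

-- per-name occurrence indices: [i for m, i in events if m == n]
def idxsOf (events : List (String × Int)) (n : String) : List Int :=
  (events.filter (fun e => e.1 == n)).map Prod.snd

def analyze_liveness_alt (operations : List (List (String × List (String × String)))) (tensor_shapes : List (String × List Int)) : List (String × Int × Int) :=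
  let events := pyEvents operations
  let names := pyNames events
  -- liveness[n] = (idxs[0], idxs[-1]); names are distinct, so the dict's items are this map
  names.map (fun n =>
    (n, PySem.List.pyGetD (idxsOf events n) 0 0, PySem.List.pyGetD (idxsOf events n) (-1) 0))

-- ===== PRECONDITION & SPEC =====
def Spec_analyze_liveness (operations : List (List (String × List (String × String)))) (tensor_shapes : List (String × List Int)) (out : List (String × Int × Int)) : Prop := out = analyze_liveness_alt operations tensor_shapes
instance (operations : List (List (String × List (String × String)))) (tensor_shapes : List (String × List Int)) (out : List (String × Int × Int)) : Decidable (Spec_analyze_liveness operations tensor_shapes out) := by unfold Spec_analyze_liveness; infer_instance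

-- ===== CLAIM (what is proved, stated in full; the proofs are below) =====
def Claim_equal_analyze_liveness : Prop := ∀ (operations : List (List (String × List (String × String)))) (tensor_shapes : List (String × List Int)), Dom_analyze_liveness operations tensor_shapes → Spec_analyze_liveness operations tensor_shapes (analyze_liveness operations tensor_shapes)

-- ===== LEMMAS AND PROOFS =====

-- A's per-event step, once the nested arg scan is flattened to events
def stepL (liv : PySem.Dict String (Int × Int)) (e : String × Int) : PySem.Dict String (Int × Int) :=
  if liv.contains e.1 = false then liv.insert e.1 (e.2, e.2)
  else liv.insert e.1 ((liv.getD e.1 (0, 0)).1, e.2)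

theorem inner_eq (i : Int) (args : List (String × String)) (liv : PySem.Dict String (Int × Int)) :
    args.foldl (stepA i) liv =
      (args.filterMap (fun a => if a.1 == "alloc" then some (a.2, i) else none)).foldl stepL liv := by
  induction args generalizing liv with
  | nil => rfl
  | cons a t ih =>
    by_cases h : (a.1 == "alloc") = true
    · rw [List.foldl_cons, show stepA i liv a = stepL liv (a.2, i) from by simp [stepA, stepL, h],
          List.filterMap_cons, if_pos h, List.foldl_cons]
      exact ih _
    · rw [List.foldl_cons, show stepA i liv a = liv from by simp [stepA, h],
          List.filterMap_cons, if_neg h]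
      exact ih _

theorem outer_eq (l : List (Int × List (String × List (String × String))))
    (liv : PySem.Dict String (Int × Int)) :
    l.foldl (fun liv p => ((PySem.Dict.mk p.2).getD "args" []).foldl (stepA p.1) liv) liv =
      (l.flatMap (fun p => ((PySem.Dict.mk p.2).getD "args" []).filterMap
        (fun a => if a.1 == "alloc" then some (a.2, p.1) else none))).foldl stepL liv := by
  induction l generalizing liv with
  | nil => rfl
  | cons a t ih =>
    simp only [List.foldl_cons, List.flatMap_cons, List.foldl_append]
    rw [ih, inner_eq]

theorem pyNames_append (es : List (String × Int)) (e : String × Int) :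
    pyNames (es ++ [e]) =
      if (pyNames es).contains e.1 then pyNames es else pyNames es ++ [e.1] := by
  unfold pyNames
  rw [List.foldl_append]
  rfl

theorem mem_pyNames (es : List (String × Int)) (n : String) :
    n ∈ pyNames es ↔ n ∈ es.map Prod.fst := by
  induction es using List.reverseRecOn with
  | nil => simp [pyNames]
  | append_singleton es e ih =>
    rw [pyNames_append]
    by_cases h : (pyNames es).contains e.1
    · simp only [h, if_true, List.map_append]
      have : e.1 ∈ pyNames es := by simpa using h
      constructor
      · intro hn; exact List.mem_append.mpr (Or.inl (ih.mp hn))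
      · intro hn
        rcases List.mem_append.mp hn with h1 | h2
        · exact ih.mpr h1
        · simp only [List.map_cons, List.map_nil, List.mem_singleton] at h2
          exact h2 ▸ this
    · simp only [h, if_false, List.map_append]
      simp [List.mem_append, ih]

theorem nodup_pyNames (es : List (String × Int)) : (pyNames es).Nodup := by
  induction es using List.reverseRecOn with
  | nil => simp [pyNames]
  | append_singleton es e ih =>
    rw [pyNames_append]
    by_cases h : (pyNames es).contains e.1
    · have hmem : e.1 ∈ pyNames es := by simpa using h
      simpa [hmem] using ih
    · have hnotin : e.1 ∉ pyNames es := by simpa using h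
      simp only [h, if_false]
      refine (List.nodup_append).mpr ⟨ih, List.nodup_singleton _, ?_⟩
      intro x hx y hy hxy
      rw [List.mem_singleton] at hy
      exact hnotin ((hxy.trans hy) ▸ hx)

theorem idxsOf_append (es : List (String × Int)) (e : String × Int) (n : String) :
    idxsOf (es ++ [e]) n = idxsOf es n ++ (if e.1 == n then [e.2] else []) := by
  unfold idxsOf
  rw [List.filter_append, List.map_append]
  by_cases h : e.1 == n <;> simp [h]

theorem idxsOf_ne_nil (es : List (String × Int)) (n : String) (h : n ∈ pyNames es) :
    idxsOf es n ≠ [] := by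
  rw [mem_pyNames] at h
  obtain ⟨e, he, rfl⟩ := List.mem_map.mp h
  unfold idxsOf
  simp only [ne_eq, List.map_eq_nil_iff, List.filter_eq_nil_iff]
  intro hall
  exact (hall e he) (by simp)

theorem idxsOf_nil_of_not_mem (es : List (String × Int)) (n : String)
    (h : n ∉ pyNames es) : idxsOf es n = [] := by
  rw [mem_pyNames] at h
  unfold idxsOf
  simp only [List.map_eq_nil_iff, List.filter_eq_nil_iff]
  intro e he hbeq
  exact h (List.mem_map.mpr ⟨e, he, by simpa using hbeq⟩)

theorem headD_append_left (l l' : List Int) (h : l ≠ []) (d : Int) :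
    (l ++ l').headD d = l.headD d := by
  cases l with
  | nil => exact absurd rfl h
  | cons a t => rfl

-- the main invariant: folding stepL over the events reproduces B's per-name read-off
theorem liv_items (es : List (String × Int)) :
    (es.foldl stepL PySem.Dict.empty).items =
      (pyNames es).map (fun n => (n, (idxsOf es n).headD 0, (idxsOf es n).getLastD 0)) := by
  induction es using List.reverseRecOn with
  | nil => rfl
  | append_singleton es e ih =>
    have hkeys : (es.foldl stepL PySem.Dict.empty).keys = pyNames es := by
      show (es.foldl stepL PySem.Dict.empty).items.map Prod.fst = _
      rw [ih, List.map_map]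
      simp [Function.comp_def]
    have hcont : ∀ k, (es.foldl stepL PySem.Dict.empty).contains k = decide (k ∈ pyNames es) := by
      intro k
      rw [PySem.Dict.contains_eq_decide_mem_keys, hkeys]
    rw [List.foldl_append, List.foldl_cons, List.foldl_nil, pyNames_append]
    by_cases hm : e.1 ∈ pyNames es
    · have hc : (es.foldl stepL PySem.Dict.empty).contains e.1 = true := by
        rw [hcont]; simpa
      have hget : (es.foldl stepL PySem.Dict.empty).getD e.1 (0, 0) =
          ((idxsOf es e.1).headD 0, (idxsOf es e.1).getLastD 0) := by
        apply PySem.Dict.getD_of_mem_items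
        · rw [ih]; exact List.mem_map.mpr ⟨e.1, hm, rfl⟩
        · rw [hkeys]; exact nodup_pyNames es
      have hs : stepL (es.foldl stepL PySem.Dict.empty) e =
          (es.foldl stepL PySem.Dict.empty).insert e.1
            (((es.foldl stepL PySem.Dict.empty).getD e.1 (0, 0)).1, e.2) := by
        rw [stepL]; rw [hc]; simp
      rw [hs]
      simp only [List.contains_eq_mem, hm, decide_true, if_true]
      rw [PySem.Dict.items_insert_of_contains _ _ hc, ih, List.map_map]
      apply List.map_congr_left
      intro m hmm
      by_cases hmn : m == e.1
      · have hmn' : m = e.1 := by simpa using hmn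
        subst hmn'
        simp only [Function.comp, hmn, if_true]
        rw [hget, idxsOf_append]
        simp only [BEq.rfl, if_true]
        rw [headD_append_left _ _ (idxsOf_ne_nil es e.1 hm), List.getLastD_concat]
      · have hne : e.1 ≠ m := by
          intro hh; subst hh; simp at hmn
        simp only [Function.comp, hmn, if_false]
        rw [idxsOf_append]
        simp [hne]
    · have hc : (es.foldl stepL PySem.Dict.empty).contains e.1 = false := by
        rw [hcont]; simpa
      have hs : stepL (es.foldl stepL PySem.Dict.empty) e =
          (es.foldl stepL PySem.Dict.empty).insert e.1 (e.2, e.2) := by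
        rw [stepL]; rw [hc]; simp
      rw [hs]
      simp only [List.contains_eq_mem, hm, decide_false, Bool.false_eq_true, if_false]
      rw [PySem.Dict.items_insert_of_not_contains _ _ hc, ih, List.map_append]
      congr 1
      · apply List.map_congr_left
        intro m hmm
        have hne : e.1 ≠ m := fun h => hm (h ▸ hmm)
        rw [idxsOf_append]
        simp [hne]
      · simp only [List.map_cons, List.map_nil]
        rw [idxsOf_append, idxsOf_nil_of_not_mem es e.1 hm]
        simp

theorem A_events (operations : List (List (String × List (String × String)))) (tensor_shapes : List (String × List Int)) :
    analyze_liveness operations tensor_shapes = ((pyEvents operations).foldl stepL PySem.Dict.empty).items := by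
  unfold analyze_liveness pyEvents
  rw [outer_eq]

-- ===== VERDICT (by name: the statement is the Claim_ definition above) =====
theorem analyze_liveness_spec : Claim_equal_analyze_liveness := by
  intro operations tensor_shapes _
  show analyze_liveness operations tensor_shapes = analyze_liveness_alt operations tensor_shapes
  rw [A_events, liv_items]
  simp only [analyze_liveness_alt]
  apply List.map_congr_left
  intro n hn
  have hne := idxsOf_ne_nil _ n hn
  rw [PySem.List.pyGetD_zero, PySem.List.pyGetD_neg_one _ _ hne]
  obtain ⟨a, t, hat⟩ := List.exists_cons_of_ne_nil hne
  have h1 : (idxsOf (pyEvents operations) n).headD 0 = (idxsOf (pyEvents operations) n).getD 0 0 := by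
    rw [hat]; rfl
  have h2 : (idxsOf (pyEvents operations) n).getLastD 0 = (idxsOf (pyEvents operations) n).getLast hne := by
    clear h1 hat
    generalize idxsOf (pyEvents operations) n = l at *
    induction l with
    | nil => exact absurd rfl hne
    | cons a t ih =>
      cases t with
      | nil => rfl
      | cons b u => simpa using ih (by simp)
  rw [h1, h2]
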